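-- pv_equiv track=rewrite | github.com/kupad/nand2tetris | 06/HackAssembler.py | dest2bits
-- ===== SOURCE A (Python) =====
-- class AssemblyError(Exception):
--     """
--     Represents an error in the assembly code.
--     """
--     def __init__(self, msg, lineno):
--         super().__init__(msg)
--         self.lineno = lineno
--
--     def __str__(self):
--         return f'Error: line {self.lineno}: {super().__str__()}'
--
-- DESTMAP = {
--     'A': 0,
--     'D': 1,
--     'M': 2,
-- }
--
-- def dest2bits(desttok, lineno):
--     """
--     Translates a destination token to binary.
--
--     Look up each register in the desttok in DESTMAP to find bit index.
--     Note that: DM and MD are both acceptable and are equivalent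
--     """
--     bits = ['0']*3
--     for dest in desttok:
--         try:
--             bits[DESTMAP[dest]] = '1'
--         except KeyError:
--             raise AssemblyError(f'unknown dest: {dest}', lineno)
--     return ''.join(bits)
-- ===== SOURCE B (Python) =====
-- class AssemblyError(Exception):
--     def __init__(self, msg, lineno):
--         super().__init__(msg)
--         self.lineno = lineno
--
--     def __str__(self):
--         return f'Error: line {self.lineno}: {super().__str__()}'
--
-- DESTMAP = {
--     'A': 0,
--     'D': 1,
--     'M': 2,
-- }
--
-- def dest2bits(desttok, lineno):
--     for dest in desttok:
--         if dest not in DESTMAP: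
--             raise AssemblyError(f'unknown dest: {dest}', lineno)
--     return ''.join('1' if r in desttok else '0' for r in 'ADM')
-- ===== Notes on version B (the rewrite author's own statement) =====
-- stated objective: simpler
-- what changed: B inverts the traversal: instead of allocating a 3-slot bit list and assigning slots via a DESTMAP index lookup per token character, it validates the token once and then builds the result by probing membership of each register in the fixed order 'ADM'.
import Mathlib
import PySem

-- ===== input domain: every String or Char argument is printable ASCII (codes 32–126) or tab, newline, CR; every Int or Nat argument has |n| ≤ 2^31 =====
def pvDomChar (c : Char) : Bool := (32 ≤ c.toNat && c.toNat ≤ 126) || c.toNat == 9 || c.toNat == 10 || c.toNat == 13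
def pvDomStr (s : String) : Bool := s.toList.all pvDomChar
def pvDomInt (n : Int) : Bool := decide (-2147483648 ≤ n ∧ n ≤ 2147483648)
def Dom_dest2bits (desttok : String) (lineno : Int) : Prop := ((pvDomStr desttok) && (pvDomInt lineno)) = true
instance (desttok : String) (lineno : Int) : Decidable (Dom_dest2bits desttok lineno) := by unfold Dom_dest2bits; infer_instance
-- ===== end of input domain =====

-- B replaces A's bit-list with per-slot index assignment by a validation pass plus
-- membership probes over the fixed register order 'ADM' (objective: simpler).
-- A raises AssemblyError on characters outside DESTMAP; those inputs are excluded by Pre_.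

-- ===== PORT A =====
-- DESTMAP = {'A': 0, 'D': 1, 'M': 2}
def DESTMAP : PySem.Dict Char Int := PySem.Dict.ofList [('A', (0:Int)), ('D', 1), ('M', 2)]

-- the loop: for dest in desttok: bits[DESTMAP[dest]] = '1'
-- (a KeyError — get? = none — raises in Python; Pre_ excludes those inputs, here bits is kept)
def dest2bitsLoop (cs : List Char) (bits : List String) : List String :=
  cs.foldl (fun bits dest =>
    match PySem.Dict.get? DESTMAP dest with
    | some i => bits.set i.toNat "1"
    | none => bits) bits

def dest2bits (desttok : String) (lineno : Int) : String :=
  String.join (dest2bitsLoop desttok.toList ["0", "0", "0"])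

-- ===== PORT B =====
-- validation loop omitted from the value: under Pre_ it never fires; then
-- ''.join('1' if r in desttok else '0' for r in 'ADM')
def dest2bits_alt (desttok : String) (lineno : Int) : String :=
  String.join (['A', 'D', 'M'].map (fun r => if desttok.toList.contains r then "1" else "0"))

-- ===== PRECONDITION & SPEC =====
-- Pre_ excludes exactly the inputs where A raises AssemblyError (a character outside DESTMAP)
def Pre_dest2bits (desttok : String) (lineno : Int) : Prop :=
  desttok.toList.all (fun c => c == 'A' || c == 'D' || c == 'M') = true
instance (desttok : String) (lineno : Int) : Decidable (Pre_dest2bits desttok lineno) := by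
  unfold Pre_dest2bits; infer_instance

def pvWitness_dest2bits : String × Int := ("MD", 7)

def Spec_dest2bits (desttok : String) (lineno : Int) (out : String) : Prop := out = dest2bits_alt desttok lineno
instance (desttok : String) (lineno : Int) (out : String) : Decidable (Spec_dest2bits desttok lineno out) := by unfold Spec_dest2bits; infer_instance

-- ===== CLAIM (what is proved, stated in full; the proofs are below) =====
def Claim_equal_dest2bits : Prop := ∀ (desttok : String) (lineno : Int), Dom_dest2bits desttok lineno → Pre_dest2bits desttok lineno → Spec_dest2bits desttok lineno (dest2bits desttok lineno)

-- ===== LEMMAS AND PROOFS =====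

-- invariant: A's loop produces the per-slot "already set or occurs later" bits
theorem dest2bitsLoop_char (cs : List Char)
    (h : ∀ c ∈ cs, c = 'A' ∨ c = 'D' ∨ c = 'M') (x y z : String) :
    dest2bitsLoop cs [x, y, z] =
      [if 'A' ∈ cs then "1" else x, if 'D' ∈ cs then "1" else y, if 'M' ∈ cs then "1" else z] := by
  induction cs generalizing x y z with
  | nil => simp [dest2bitsLoop]
  | cons c t ih =>
    have hc := h c (List.mem_cons_self ..)
    have ht : ∀ c ∈ t, c = 'A' ∨ c = 'D' ∨ c = 'M' := fun c hm => h c (List.mem_cons_of_mem _ hm)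
    rcases hc with rfl | rfl | rfl
    · rw [show dest2bitsLoop ('A' :: t) [x, y, z] = dest2bitsLoop t ["1", y, z] from rfl, ih ht]
      simp
    · rw [show dest2bitsLoop ('D' :: t) [x, y, z] = dest2bitsLoop t [x, "1", z] from rfl, ih ht]
      simp
    · rw [show dest2bitsLoop ('M' :: t) [x, y, z] = dest2bitsLoop t [x, y, "1"] from rfl, ih ht]
      simp

-- ===== VERDICT (by name: the statement is the Claim_ definition above) =====
theorem dest2bits_spec : Claim_equal_dest2bits := by
  intro desttok lineno _ hpre
  unfold Pre_dest2bits at hpre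
  have hpre' : ∀ c ∈ desttok.toList, c = 'A' ∨ c = 'D' ∨ c = 'M' := by
    intro c hc
    have := List.all_eq_true.mp hpre c hc
    simpa [or_assoc] using this
  unfold Spec_dest2bits dest2bits dest2bits_alt
  rw [dest2bitsLoop_char desttok.toList hpre']
  by_cases hA : 'A' ∈ desttok.toList <;> by_cases hD : 'D' ∈ desttok.toList <;>
    by_cases hM : 'M' ∈ desttok.toList <;> simp [hA, hD, hM]
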